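-- pv_equiv track=rewrite | github.com/GUNTIKALYAN/AgenticRAG | backend/app/services/context_builder.py | build
-- ===== SOURCE A (Python) =====
-- def build(docs, max_chars=3000):
--
--     context_parts = []
--     sources = []
--     total_length = 0
--
--     for doc in docs:
--         metadata = doc.get("metadata", {})
--         text = metadata.get("text", "")
--         source = metadata.get("source", "unknown")
--
--         if not text:
--             continue
--
--         # Stop if too long
--         if total_length + len(text) > max_chars:
--             break
--
--         context_parts.append(f"[Source: {source}]\n{text}")
--         sources.append(source)
--
--         total_length += len(text)
--
--     context = "\n\n".join(context_parts)
--
--     return context, list(set(sources))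
-- ===== SOURCE B (Python) =====
-- def build(docs, max_chars=3000):
--     # phase 1: keep (text, source) for docs whose metadata text is non-empty
--     pairs = []
--     for doc in docs:
--         md = doc.get("metadata", {})
--         if md.get("text", ""):
--             pairs.append((md.get("text", ""), md.get("source", "unknown")))
--     # phase 2: cumulative char totals and the first index whose total exceeds max_chars
--     totals = []
--     run = 0
--     for t, _ in pairs:
--         run += len(t)
--         totals.append(run)
--     cut = next((i for i, tot in enumerate(totals) if tot > max_chars), len(pairs))
--     taken = pairs[:cut]
--     # phase 3: format and join
--     context = "\n\n".join("[Source: {}]\n{}".format(s, t) for t, s in taken)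
--     return context, list(set(s for _, s in taken))
-- ===== Notes on version B (the rewrite author's own statement) =====
-- stated objective: alternative
-- what changed: Replaces A's single stateful loop (running total, break, two growing lists) by a three-phase pipeline: filter the docs with non-empty metadata text, compute cumulative text lengths and cut at the first prefix total exceeding max_chars, then format/join the kept prefix.
import Mathlib
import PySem

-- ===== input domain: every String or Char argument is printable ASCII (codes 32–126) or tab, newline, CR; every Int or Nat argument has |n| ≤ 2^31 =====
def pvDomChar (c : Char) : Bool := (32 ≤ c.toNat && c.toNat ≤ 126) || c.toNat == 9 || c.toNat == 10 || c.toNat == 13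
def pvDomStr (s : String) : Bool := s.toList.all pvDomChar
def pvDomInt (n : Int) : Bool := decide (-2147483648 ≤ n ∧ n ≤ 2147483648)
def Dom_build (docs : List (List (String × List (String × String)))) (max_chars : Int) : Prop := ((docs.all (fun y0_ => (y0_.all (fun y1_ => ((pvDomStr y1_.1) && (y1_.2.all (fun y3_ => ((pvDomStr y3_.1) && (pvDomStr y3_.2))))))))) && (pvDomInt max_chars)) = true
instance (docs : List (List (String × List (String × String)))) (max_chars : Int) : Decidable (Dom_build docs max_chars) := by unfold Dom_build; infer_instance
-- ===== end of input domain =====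

-- B: three-phase pipeline (filter non-empty docs, cumulative-total cutoff, format/join) instead of A's single stateful loop; same asymptotic cost.
-- ===== PORT A =====
def buildLoop (mc : Int) : List (List (String × List (String × String))) → List String → List String → Int → List String × List String
  | [], parts, srcs, _ => (parts, srcs)
  | doc :: rest, parts, srcs, tot =>
    let md := PySem.Dict.getD ⟨doc⟩ "metadata" []
    let text := PySem.Dict.getD ⟨md⟩ "text" ""
    let source := PySem.Dict.getD ⟨md⟩ "source" "unknown"
    if text = "" then buildLoop mc rest parts srcs tot
    else if tot + PySem.Str.len text > mc then (parts, srcs)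
    else buildLoop mc rest (parts ++ ["[Source: " ++ source ++ "]\n" ++ text]) (srcs ++ [source]) (tot + PySem.Str.len text)

def build (docs : List (List (String × List (String × String)))) (max_chars : Int) : String × List String :=
  let (context_parts, sources) := buildLoop max_chars docs [] [] 0
  (PySem.Str.join "\n\n" context_parts, PySem.Set.ofList sources)

-- ===== PORT B =====
-- phase-2 loop of Source B: the running total producing the list of cumulative totals
def totalsFrom : List (String × String) → Int → List Int
  | [], _ => []
  | p :: ps, run => (run + PySem.Str.len p.1) :: totalsFrom ps (run + PySem.Str.len p.1)

def build_alt (docs : List (List (String × List (String × String)))) (max_chars : Int) : String × List String :=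
  let pairs := docs.filterMap (fun doc =>
    let md := PySem.Dict.getD ⟨doc⟩ "metadata" []
    if PySem.Dict.getD ⟨md⟩ "text" "" = "" then none
    else some (PySem.Dict.getD ⟨md⟩ "text" "", PySem.Dict.getD ⟨md⟩ "source" "unknown"))
  let totals := totalsFrom pairs 0
  let cut := (totals.findIdx? (fun tot => decide (tot > max_chars))).getD pairs.length
  let taken := pairs.take cut
  (PySem.Str.join "\n\n" (taken.map (fun p => "[Source: " ++ p.2 ++ "]\n" ++ p.1)),
   PySem.Set.ofList (taken.map Prod.snd))

-- ===== PRECONDITION & SPEC =====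
def Spec_build (docs : List (List (String × List (String × String)))) (max_chars : Int) (out : String × List String) : Prop := out = build_alt docs max_chars
instance (docs : List (List (String × List (String × String)))) (max_chars : Int) (out : String × List String) : Decidable (Spec_build docs max_chars out) := by unfold Spec_build; infer_instance

-- ===== CLAIM (what is proved, stated in full; the proofs are below) =====
def Claim_equal_build : Prop := ∀ (docs : List (List (String × List (String × String)))) (max_chars : Int), Dom_build docs max_chars → Spec_build docs max_chars (build docs max_chars)

-- ===== LEMMAS AND PROOFS =====

-- the kept (text, source) pairs of the docs (B's phase 1, reused by both proofs)
def keptOf (docs : List (List (String × List (String × String)))) : List (String × String) :=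
  docs.filterMap (fun doc =>
    let md := PySem.Dict.getD ⟨doc⟩ "metadata" []
    if PySem.Dict.getD ⟨md⟩ "text" "" = "" then none
    else some (PySem.Dict.getD ⟨md⟩ "text" "", PySem.Dict.getD ⟨md⟩ "source" "unknown"))

-- the prefix of pairs whose cumulative length starting from tot stays ≤ mc
def takeWithin (mc : Int) : List (String × String) → Int → List (String × String)
  | [], _ => []
  | p :: ps, tot =>
    if tot + PySem.Str.len p.1 > mc then []
    else p :: takeWithin mc ps (tot + PySem.Str.len p.1)

theorem cut_eq_takeWithin (mc : Int) (ps : List (String × String)) (tot : Int) :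
    ps.take (((totalsFrom ps tot).findIdx? (fun t => decide (t > mc))).getD ps.length)
      = takeWithin mc ps tot := by
  induction ps generalizing tot with
  | nil => simp [totalsFrom, takeWithin]
  | cons p ps ih =>
    rw [totalsFrom, takeWithin, List.findIdx?_cons]
    by_cases h : tot + PySem.Str.len p.1 > mc
    · rw [if_pos h, if_pos (by simpa using h)]
      simp
    · rw [if_neg h, if_neg (by simpa using h)]
      have hrec := ih (tot + PySem.Str.len p.1)
      cases hf : (totalsFrom ps (tot + PySem.Str.len p.1)).findIdx? (fun t => decide (t > mc)) with
      | none =>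
        rw [hf] at hrec
        simp only [Option.map_none, Option.getD_none, List.length_cons, List.take_succ_cons]
        rw [← hrec]
        simp
      | some n =>
        rw [hf] at hrec
        simp only [Option.map_some, Option.getD_some, List.take_succ_cons]
        rw [← hrec]
        simp

theorem buildLoop_eq (mc : Int) (docs : List (List (String × List (String × String))))
    (parts srcs : List String) (tot : Int) :
    buildLoop mc docs parts srcs tot
      = (parts ++ (takeWithin mc (keptOf docs) tot).map (fun p => "[Source: " ++ p.2 ++ "]\n" ++ p.1),
         srcs ++ (takeWithin mc (keptOf docs) tot).map Prod.snd) := by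
  induction docs generalizing parts srcs tot with
  | nil => simp [buildLoop, keptOf, takeWithin]
  | cons doc rest ih =>
    rw [buildLoop, keptOf, List.filterMap_cons]
    by_cases ht : PySem.Dict.getD ⟨PySem.Dict.getD ⟨doc⟩ "metadata" []⟩ "text" "" = ""
    · rw [if_pos ht, if_pos ht]
      exact ih parts srcs tot
    · rw [if_neg ht, if_neg ht]
      by_cases hb : tot + PySem.Str.len (PySem.Dict.getD ⟨PySem.Dict.getD ⟨doc⟩ "metadata" []⟩ "text" "") > mc
      · rw [if_pos hb]
        rw [takeWithin, if_pos hb]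
        simp
      · rw [if_neg hb, ih]
        rw [takeWithin, if_neg hb]
        simp [keptOf]

-- ===== VERDICT (by name: the statement is the Claim_ definition above) =====
theorem build_spec : Claim_equal_build := by
  intro docs max_chars _
  unfold Spec_build
  show build docs max_chars = build_alt docs max_chars
  unfold build build_alt
  rw [buildLoop_eq]
  simp only [List.nil_append]
  rw [cut_eq_takeWithin]
  rfl
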